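-- pv_equiv track=rewrite | github.com/Stellar-proximology/-Synthia-The-Synthesis-Intelligence-Field | oracle (1).py | parse_punctuation
-- ===== SOURCE A (Python) =====
-- punctuation_resonance = {
--     ":": "heaven_to_earth_initiation",     # Genesis 1:3 (cause to manifestation)
--     ";": "spirit_breath_pause",            # Ecclesiastes 3:2 (space for Holy Spirit between parallels)
--     ".": "archetype_expression_locator"    # Gate.Line model
-- }
--
-- def parse_punctuation(input_str):
--     """Decode punctuation in input, with resonance meanings."""
--     results = {}
--     if ':' in input_str:
--         results[':'] = punctuation_resonance[':']
--     if ';' in input_str: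
--         results[';'] = punctuation_resonance[';']
--     if '.' in input_str and any(char.isdigit() for char in input_str):
--         results['.'] = punctuation_resonance['.']
--     return results
-- ===== SOURCE B (Python) =====
-- def parse_punctuation(input_str):
--     """Decode punctuation in input, with resonance meanings (single pass)."""
--     seen_colon = seen_semicolon = seen_dot = seen_digit = False
--     for ch in input_str:
--         if ch == ':':
--             seen_colon = True
--         elif ch == ';':
--             seen_semicolon = True
--         elif ch == '.':
--             seen_dot = True
--         elif ch.isdigit():
--             seen_digit = True
--     results = {}
--     if seen_colon:
--         results[':'] = "heaven_to_earth_initiation"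
--     if seen_semicolon:
--         results[';'] = "spirit_breath_pause"
--     if seen_dot and seen_digit:
--         results['.'] = "archetype_expression_locator"
--     return results
-- ===== Notes on version B (the rewrite author's own statement) =====
-- stated objective: simpler
-- what changed: Four separate scans of the string (three substring tests plus an any() generator) are replaced by one loop maintaining four booleans, with the dict built afterwards in fixed order.
import Mathlib
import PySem

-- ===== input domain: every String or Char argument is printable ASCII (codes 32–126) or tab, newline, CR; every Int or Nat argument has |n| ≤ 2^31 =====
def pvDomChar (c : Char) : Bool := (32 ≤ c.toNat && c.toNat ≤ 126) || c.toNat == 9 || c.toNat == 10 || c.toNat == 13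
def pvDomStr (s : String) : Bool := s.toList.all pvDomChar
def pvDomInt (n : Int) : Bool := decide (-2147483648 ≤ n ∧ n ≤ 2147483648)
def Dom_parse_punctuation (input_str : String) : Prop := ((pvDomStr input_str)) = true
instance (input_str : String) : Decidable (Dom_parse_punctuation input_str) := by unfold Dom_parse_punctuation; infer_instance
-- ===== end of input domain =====

-- B replaces A's three substring tests plus any()-scan by a single pass keeping four booleans (objective: simpler).

-- ===== PORT A =====
def parse_punctuation (input_str : String) : List (String × String) :=
  let results : PySem.Dict String String := PySem.Dict.empty
  let results := if PySem.Str.isIn ":" input_str then results.insert ":" "heaven_to_earth_initiation" else results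
  let results := if PySem.Str.isIn ";" input_str then results.insert ";" "spirit_breath_pause" else results
  let results := if PySem.Str.isIn "." input_str && input_str.toList.any (fun ch => PySem.Chars.isdigit ch)
                 then results.insert "." "archetype_expression_locator" else results
  results.items

-- ===== PORT B =====
def pvStepB (st : Bool × Bool × Bool × Bool) (ch : Char) : Bool × Bool × Bool × Bool :=
  if ch = ':' then (true, st.2.1, st.2.2.1, st.2.2.2)
  else if ch = ';' then (st.1, true, st.2.2.1, st.2.2.2)
  else if ch = '.' then (st.1, st.2.1, true, st.2.2.2)
  else if PySem.Chars.isdigit ch then (st.1, st.2.1, st.2.2.1, true)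
  else st

def parse_punctuation_alt (input_str : String) : List (String × String) :=
  let st := input_str.toList.foldl pvStepB (false, false, false, false)
  let results : PySem.Dict String String := PySem.Dict.empty
  let results := if st.1 then results.insert ":" "heaven_to_earth_initiation" else results
  let results := if st.2.1 then results.insert ";" "spirit_breath_pause" else results
  let results := if st.2.2.1 && st.2.2.2 then results.insert "." "archetype_expression_locator" else results
  results.items

-- ===== PRECONDITION & SPEC =====
def Spec_parse_punctuation (input_str : String) (out : List (String × String)) : Prop := out = parse_punctuation_alt input_str
instance (input_str : String) (out : List (String × String)) : Decidable (Spec_parse_punctuation input_str out) := by unfold Spec_parse_punctuation; infer_instance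

-- ===== CLAIM (what is proved, stated in full; the proofs are below) =====
def Claim_equal_parse_punctuation : Prop := ∀ (input_str : String), Dom_parse_punctuation input_str → Spec_parse_punctuation input_str (parse_punctuation input_str)

-- ===== LEMMAS AND PROOFS =====

-- the single-pass fold computes exactly the four "seen" flags
theorem pvFold_spec (l : List Char) (b : Bool × Bool × Bool × Bool) :
    l.foldl pvStepB b =
      (b.1 || l.any (· == ':'), b.2.1 || l.any (· == ';'),
       b.2.2.1 || l.any (· == '.'), b.2.2.2 || l.any (fun c => PySem.Chars.isdigit c)) := by
  induction l generalizing b with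
  | nil => simp
  | cons c t ih =>
    simp only [List.foldl_cons, List.any_cons, ih]
    by_cases h1 : c = ':'
    · subst h1; simp [pvStepB, PySem.Chars.isdigit]
    · by_cases h2 : c = ';'
      · subst h2; simp [pvStepB, PySem.Chars.isdigit]
      · by_cases h3 : c = '.'
        · subst h3; simp [pvStepB, PySem.Chars.isdigit]
        · by_cases h4 : PySem.Chars.isdigit c
          · simp [pvStepB, h1, h2, h3, h4,
              beq_eq_false_iff_ne.mpr h1, beq_eq_false_iff_ne.mpr h2, beq_eq_false_iff_ne.mpr h3]
          · simp [pvStepB, h1, h2, h3, h4,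
              beq_eq_false_iff_ne.mpr h1, beq_eq_false_iff_ne.mpr h2, beq_eq_false_iff_ne.mpr h3]

-- a one-character substring test is a membership scan
theorem pvIsIn_singleton (c : Char) (s : String) :
    PySem.Chars.isIn [c] s.toList = s.toList.any (· == c) := by
  rcases h : s.toList.any (· == c) with _ | _
  · rw [PySem.Chars.isIn_eq_false_iff, List.singleton_infix_iff]
    simp only [List.any_eq_false, beq_iff_eq] at h
    exact fun hm => h c hm rfl
  · rw [PySem.Chars.isIn_iff_infix, List.singleton_infix_iff]
    simp only [List.any_eq_true, beq_iff_eq] at h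
    obtain ⟨x, hx, rfl⟩ := h
    exact hx

theorem parse_punctuation_spec : Claim_equal_parse_punctuation := by
  intro s _
  unfold Spec_parse_punctuation parse_punctuation parse_punctuation_alt
  rw [pvFold_spec]
  have h1 : PySem.Str.isIn ":" s = s.toList.any (· == ':') := by
    rw [PySem.Str.isIn_eq]; exact pvIsIn_singleton ':' s
  have h2 : PySem.Str.isIn ";" s = s.toList.any (· == ';') := by
    rw [PySem.Str.isIn_eq]; exact pvIsIn_singleton ';' s
  have h3 : PySem.Str.isIn "." s = s.toList.any (· == '.') := by
    rw [PySem.Str.isIn_eq]; exact pvIsIn_singleton '.' s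
  simp only [h1, h2, h3, Bool.false_or]
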